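-- pv_equiv track=rewrite | github.com/girugamoz/Minecraft-Overviewer | world.py | _convert_coords
-- ===== SOURCE A (Python) =====
-- def _convert_coords(chunks):
--     """Takes the list of (chunkx, chunky, chunkfile) where chunkx and chunky
--     are in the chunk coordinate system, and figures out the row and column in
--     the image each one should be.
--
--     returns mincol, maxcol, minrow, maxrow, chunks_translated
--     chunks_translated is a list of (col, row, (chunkX, chunkY))
--
--     The (chunkX, chunkY) tuple is the chunkCoords, used to identify the
--     chunk file
--     """
--     chunks_translated = []
--     # columns are determined by the sum of the chunk coords, rows are the
--     # difference
--     item = chunks[0]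
--     mincol = maxcol = item[0] + item[1]
--     minrow = maxrow = item[1] - item[0]
--     for c in chunks:
--         col = c[0] + c[1]
--         mincol = min(mincol, col)
--         maxcol = max(maxcol, col)
--         row = c[1] - c[0]
--         minrow = min(minrow, row)
--         maxrow = max(maxrow, row)
--         chunks_translated.append((col, row, (c[0],c[1])))
--
--     return mincol, maxcol, minrow, maxrow, chunks_translated
-- ===== SOURCE B (Python) =====
-- def _convert_coords(chunks):
--     chunks_translated = [(x + y, y - x, (x, y)) for x, y, _ in chunks]
--     mincol = min(t[0] for t in chunks_translated)
--     maxcol = max(t[0] for t in chunks_translated)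
--     minrow = min(t[1] for t in chunks_translated)
--     maxrow = max(t[1] for t in chunks_translated)
--     return mincol, maxcol, minrow, maxrow, chunks_translated
-- ===== Notes on version B (the rewrite author's own statement) =====
-- stated objective: idiomatic
-- what changed: B builds the translated list in one comprehension and computes each extremum by a separate min/max reduction over it, instead of A's single loop that threads four running extrema (seeded from chunks[0]) and appends as it goes.
import Mathlib
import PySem

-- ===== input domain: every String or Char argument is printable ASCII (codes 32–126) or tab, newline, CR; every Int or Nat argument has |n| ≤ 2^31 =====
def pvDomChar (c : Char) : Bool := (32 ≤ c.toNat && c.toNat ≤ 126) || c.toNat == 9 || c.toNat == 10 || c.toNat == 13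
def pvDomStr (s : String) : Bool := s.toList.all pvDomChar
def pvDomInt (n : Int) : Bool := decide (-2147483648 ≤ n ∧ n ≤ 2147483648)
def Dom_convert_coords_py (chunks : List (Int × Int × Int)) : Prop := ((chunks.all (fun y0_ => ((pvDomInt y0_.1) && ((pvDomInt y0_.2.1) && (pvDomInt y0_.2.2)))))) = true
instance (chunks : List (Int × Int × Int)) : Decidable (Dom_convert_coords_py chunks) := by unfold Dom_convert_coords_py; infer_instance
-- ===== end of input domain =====

-- B builds the translated list in one comprehension, then takes min/max by separate reductions,
-- instead of A's single loop threading four running extrema seeded from chunks[0]. Objective: idiomatic.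

-- Python's two-argument min/max (first argument wins ties), shared by both ports:
def pyMin (a b : Int) : Int := if b < a then b else a
def pyMax (a b : Int) : Int := if a < b then b else a

-- ===== PORT A =====
-- A: item = chunks[0]; seed the four extrema; one loop updating them and appending.
def convert_coords_py (chunks : List (Int × Int × Int)) : Int × Int × Int × Int × (List (Int × Int × (Int × Int))) :=
  match chunks with
  | [] => (0, 0, 0, 0, [])  -- unreachable under Pre_: chunks[0] raises IndexError in Python
  | item :: _ =>
    let mincol := item.1 + item.2.1
    let minrow := item.2.1 - item.1
    let st := chunks.foldl
      (fun (s : Int × Int × Int × Int × List (Int × Int × (Int × Int))) c =>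
        let col := c.1 + c.2.1
        let row := c.2.1 - c.1
        (pyMin s.1 col, pyMax s.2.1 col, pyMin s.2.2.1 row, pyMax s.2.2.2.1 row,
         s.2.2.2.2 ++ [(col, row, (c.1, c.2.1))]))
      (mincol, mincol, minrow, minrow, [])
    st

-- ===== PORT B =====
-- min(gen)/max(gen) over a nonempty list: fold from the head.
def pvMinList (l : List Int) : Int :=
  match l with
  | [] => 0  -- unreachable under Pre_: Python min raises ValueError
  | h :: t => t.foldl pyMin h

def pvMaxList (l : List Int) : Int :=
  match l with
  | [] => 0  -- unreachable under Pre_: Python max raises ValueError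
  | h :: t => t.foldl pyMax h

def convert_coords_py_alt (chunks : List (Int × Int × Int)) : Int × Int × Int × Int × (List (Int × Int × (Int × Int))) :=
  let ct := chunks.map (fun c => (c.1 + c.2.1, c.2.1 - c.1, (c.1, c.2.1)))
  (pvMinList (ct.map (fun t => t.1)), pvMaxList (ct.map (fun t => t.1)),
   pvMinList (ct.map (fun t => t.2.1)), pvMaxList (ct.map (fun t => t.2.1)), ct)

-- ===== PRECONDITION & SPEC =====
-- Pre_ excludes only the empty list, on which A raises IndexError (chunks[0]).
def Pre_convert_coords_py (chunks : List (Int × Int × Int)) : Prop := chunks ≠ []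
instance (chunks : List (Int × Int × Int)) : Decidable (Pre_convert_coords_py chunks) := by unfold Pre_convert_coords_py; infer_instance
def pvWitness_convert_coords_py : (List (Int × Int × Int)) := [(1, 2, 3)]

def Spec_convert_coords_py (chunks : List (Int × Int × Int)) (out : Int × Int × Int × Int × (List (Int × Int × (Int × Int)))) : Prop := out = convert_coords_py_alt chunks
-- instance search fails to nest Prod/List DecidableEq this deep here; the same instance, spelled out:
def pvDecEqOut : DecidableEq (Int × Int × Int × Int × (List (Int × Int × (Int × Int)))) :=
  @instDecidableEqProd _ _ _ (@instDecidableEqProd _ _ _ (@instDecidableEqProd _ _ _ (@instDecidableEqProd _ _ _ List.hasDecEq)))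
instance (chunks : List (Int × Int × Int)) (out : Int × Int × Int × Int × (List (Int × Int × (Int × Int)))) : Decidable (Spec_convert_coords_py chunks out) := by unfold Spec_convert_coords_py; exact pvDecEqOut _ _

-- ===== CLAIM (what is proved, stated in full; the proofs are below) =====
def Claim_equal_convert_coords_py : Prop := ∀ (chunks : List (Int × Int × Int)), Dom_convert_coords_py chunks → Pre_convert_coords_py chunks → Spec_convert_coords_py chunks (convert_coords_py chunks)

-- ===== LEMMAS AND PROOFS =====

-- A's fold, characterised: the four extrema are folds of min/max over the mapped columns/rows,
-- and the accumulated list is the map, appended to the accumulator.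
@[simp] theorem pyMin_self (a : Int) : pyMin a a = a := by simp [pyMin]
@[simp] theorem pyMax_self (a : Int) : pyMax a a = a := by simp [pyMax]

theorem convert_foldA (l : List (Int × Int × Int)) (mc Mc mr Mr : Int)
    (acc : List (Int × Int × (Int × Int))) :
    l.foldl
      (fun (s : Int × Int × Int × Int × List (Int × Int × (Int × Int))) c =>
        let col := c.1 + c.2.1
        let row := c.2.1 - c.1
        (pyMin s.1 col, pyMax s.2.1 col, pyMin s.2.2.1 row, pyMax s.2.2.2.1 row,
         s.2.2.2.2 ++ [(col, row, (c.1, c.2.1))]))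
      (mc, Mc, mr, Mr, acc)
    = ((l.map (fun c => c.1 + c.2.1)).foldl pyMin mc,
       (l.map (fun c => c.1 + c.2.1)).foldl pyMax Mc,
       (l.map (fun c => c.2.1 - c.1)).foldl pyMin mr,
       (l.map (fun c => c.2.1 - c.1)).foldl pyMax Mr,
       acc ++ l.map (fun c => (c.1 + c.2.1, c.2.1 - c.1, (c.1, c.2.1)))) := by
  induction l generalizing mc Mc mr Mr acc with
  | nil => simp
  | cons h t ih => simp [List.foldl_cons, ih]

theorem convert_coords_py_spec : Claim_equal_convert_coords_py := by
  intro chunks _ hpre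
  unfold Spec_convert_coords_py
  match chunks with
  | [] => exact absurd rfl hpre
  | c :: t =>
    simp only [convert_coords_py, convert_coords_py_alt, pvMinList, pvMaxList,
      List.map_cons, List.foldl_cons, convert_foldA]
    simp [Function.comp_def]
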